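-- pv_equiv track=rewrite | github.com/hashPirate/2048-autosolver | 2048algorithm.py | getCombinationValue
-- ===== SOURCE A (Python) =====
-- def getCombinationValue(board):
--     combinationValue = 0
--     for row in board:
--         for i in range(len(row) - 1):
--             if row[i] == row[i + 1] and row[i] != '.':
--                 combinationValue += int(row[i]) * 2
--     for col in range(len(board[0])):
--         for row in range(len(board) - 1):
--             if board[row][col] == board[row + 1][col] and board[row][col] != '.':
--                 combinationValue += int(board[row][col]) * 2
--
--     return combinationValue
-- ===== SOURCE B (Python) =====
-- def getCombinationValue(board):
--     cols = len(board[0])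
--     total = 0
--     prev = None
--     for cur in board:
--         n = len(cur)
--         for i, v in enumerate(cur):
--             if i + 1 < n and v == cur[i + 1] and v != '.':
--                 total += 2 * int(v)
--             if prev is not None and i < cols and prev[i] == v and v != '.':
--                 total += 2 * int(v)
--         prev = cur
--     return total
-- ===== Notes on version B (the rewrite author's own statement) =====
-- stated objective: alternative
-- what changed: Replaces A's two staged passes (a horizontal per-row index scan, then a second column-major vertical pass that re-indexes the whole board via board[row][col]) with ONE streaming top-to-bottom pass that carries only the previous row as state and, per cell, scores its right neighbour and the cell directly above it.
-- outside the precondition, e.g. on getCombinationValue([]): A raises IndexError, B raises IndexError; on getCombinationValue([['2', '2'], ['2']]): A raises IndexError, B returns 8; on getCombinationValue([['x', 'x']]): A raises ValueError, B raises ValueError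
import Mathlib
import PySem

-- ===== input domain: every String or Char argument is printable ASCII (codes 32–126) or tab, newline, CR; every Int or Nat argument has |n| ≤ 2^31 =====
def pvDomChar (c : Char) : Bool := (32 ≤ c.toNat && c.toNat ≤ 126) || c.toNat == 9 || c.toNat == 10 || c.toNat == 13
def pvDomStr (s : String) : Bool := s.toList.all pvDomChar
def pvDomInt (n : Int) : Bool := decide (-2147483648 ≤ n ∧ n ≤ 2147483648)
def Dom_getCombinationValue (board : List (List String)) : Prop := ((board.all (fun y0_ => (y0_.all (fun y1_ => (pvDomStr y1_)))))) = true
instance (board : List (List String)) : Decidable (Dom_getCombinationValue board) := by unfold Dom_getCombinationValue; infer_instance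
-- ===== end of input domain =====

-- B replaces A's two staged passes (per-row horizontal scan, then a separate column-major vertical scan
-- that re-indexes the whole board) by ONE streaming top-to-bottom pass that keeps only the previous row
-- as state and scores each cell against its right and upper neighbour (objective: alternative).

-- ===== PORT A =====
def getCombinationValue (board : List (List String)) : Int :=
  -- first loop: horizontal neighbours, per row, by index
  let cv1 : Int := board.foldl (fun acc row =>
    (PySem.List.pyRange 0 ((row.length : Int) - 1)).foldl (fun a i =>
      let x := (PySem.List.pyGet? row i).getD ""      -- row[i]   (in range on Pre_)
      let y := (PySem.List.pyGet? row (i + 1)).getD ""  -- row[i+1]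
      if x == y && x != "." then a + ((PySem.Int.ofStr? x).getD 0) * 2 else a) acc) 0
  -- second loop: vertical neighbours, column-major, len(board[0]) columns
  let row0 := (PySem.List.pyGet? board 0).getD []     -- board[0] (board ≠ [] on Pre_)
  (PySem.List.pyRange 0 (row0.length : Int)).foldl (fun a col =>
    (PySem.List.pyRange 0 ((board.length : Int) - 1)).foldl (fun a r =>
      let x := (PySem.List.pyGet? ((PySem.List.pyGet? board r).getD []) col).getD ""
      let y := (PySem.List.pyGet? ((PySem.List.pyGet? board (r + 1)).getD []) col).getD ""
      if x == y && x != "." then a + ((PySem.Int.ofStr? x).getD 0) * 2 else a) a) cv1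

-- ===== PORT B =====
-- single streaming pass: fold over the rows carrying (previous row, running total);
-- per row, one enumerate loop scores the right neighbour and the cell above.
def getCombinationValue_alt (board : List (List String)) : Int :=
  let cols : Int := (((PySem.List.pyGet? board 0).getD []).length : Int)   -- len(board[0])
  (board.foldl (fun (st : Option (List String) × Int) cur =>
    let n : Int := (cur.length : Int)
    let total := (PySem.List.enumerate cur).foldl (fun t p =>
      let t := if decide (p.1 + 1 < n) && (p.2 == (PySem.List.pyGet? cur (p.1 + 1)).getD "") && p.2 != "."
               then t + 2 * ((PySem.Int.ofStr? p.2).getD 0) else t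
      match st.1 with
      | some prev =>
          if decide (p.1 < cols) && ((PySem.List.pyGet? prev p.1).getD "" == p.2) && p.2 != "."
          then t + 2 * ((PySem.Int.ofStr? p.2).getD 0) else t
      | none => t) st.2
    (some cur, total)) ((none : Option (List String)), (0 : Int))).2

-- ===== PRECONDITION & SPEC =====
-- Pre_ excludes exactly the inputs where the Python A raises: the empty board (IndexError on board[0]),
-- ragged boards whose vertical pass indexes past a short row (IndexError), and boards where some compared
-- equal non-'.' pair is not int-parseable (ValueError on int(...)).
def Pre_getCombinationValue (board : List (List String)) : Prop :=
  board ≠ [] ∧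
  (2 ≤ board.length → ∀ row ∈ board, ((board.getD 0 []).length ≤ row.length)) ∧
  (∀ row ∈ board, ∀ i < row.length - 1,
    (row.getD i "" = row.getD (i+1) "" ∧ row.getD i "" ≠ ".") →
      (PySem.Int.ofStr? (row.getD i "")).isSome) ∧
  (∀ c < (board.getD 0 []).length, ∀ r < board.length - 1,
    ((board.getD r []).getD c "" = (board.getD (r+1) []).getD c "" ∧ (board.getD r []).getD c "" ≠ ".") →
      (PySem.Int.ofStr? ((board.getD r []).getD c "")).isSome)
instance (board : List (List String)) : Decidable (Pre_getCombinationValue board) := by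
  unfold Pre_getCombinationValue; infer_instance

def pvWitness_getCombinationValue : List (List String) :=
  [["2", "2", "."], ["2", "4", "4"]]

def Spec_getCombinationValue (board : List (List String)) (out : Int) : Prop := out = getCombinationValue_alt board
instance (board : List (List String)) (out : Int) : Decidable (Spec_getCombinationValue board out) := by unfold Spec_getCombinationValue; infer_instance

-- ===== CLAIM =====
def Claim_equal_getCombinationValue : Prop := ∀ (board : List (List String)), Dom_getCombinationValue board → Pre_getCombinationValue board → Spec_getCombinationValue board (getCombinationValue board)

-- ===== LEMMAS AND PROOFS =====

-- the score of one compared pair (shared shape of both programs' contribution)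
def pvG (a b : String) : Int :=
  if a == b && a != "." then ((PySem.Int.ofStr? a).getD 0) * 2 else 0

-- horizontal score of one row, index form
def pvH (row : List String) : Int :=
  ((List.range (row.length - 1)).map (fun i => pvG (row.getD i "") (row.getD (i+1) ""))).sum

-- vertical score of two consecutive rows over the first k columns, index form
def pvV (k : Nat) (p q : List String) : Int :=
  ((List.range k).map (fun c => pvG (p.getD c "") (q.getD c ""))).sum

lemma pvG_left_default (b : String) : pvG "" b = 0 := by
  unfold pvG; split
  · decide
  · rfl

-- B's per-cell score (condition/value read off the SECOND component) equals pvG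
lemma pvG_swap (a b : String) :
    (if a == b && b != "." then 2 * ((PySem.Int.ofStr? b).getD 0) else 0) = pvG a b := by
  unfold pvG
  by_cases h : (a == b) = true
  · rw [beq_iff_eq] at h; subst h; split <;> [ring; rfl]
  · simp [h]

-- index-shifted scan over one list = scan over the list zipped with its tail
lemma pvZipShift {α : Type} (d : α) (f : α → α → Int) :
    ∀ (l : List α),
    ((List.range (l.length - 1)).map (fun i => f (l.getD i d) (l.getD (i+1) d))).sum
    = ((l.zip (l.drop 1)).map (fun p => f p.1 p.2)).sum := by
  intro l
  induction l with
  | nil => rfl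
  | cons x t ih =>
    cases t with
    | nil => rfl
    | cons y t' =>
      simp only [List.length_cons, Nat.add_sub_cancel, List.range_succ_eq_map,
        List.map_cons, List.map_map, List.sum_cons, List.drop_one, List.tail_cons,
        List.zip_cons_cons]
      have := ih
      simp only [List.length_cons, Nat.add_sub_cancel, List.drop_one, List.tail_cons] at this
      simp only [Function.comp_def, List.getD_cons_succ, List.getD_cons_zero] at *
      rw [← this]

-- a guarded range sum equals the range sum over the guard bound, when terms past n vanish
lemma pvSumIte (f : Nat → Int) (n m : Nat) (h0 : ∀ c, n ≤ c → f c = 0) :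
    ((List.range n).map (fun i => if i < m then f i else 0)).sum = ((List.range m).map f).sum := by
  rcases Nat.le_total n m with h | h
  · have h1 : ((List.range n).map (fun i => if i < m then f i else 0)) = (List.range n).map f := by
      apply List.map_congr_left; intro i hi
      rw [List.mem_range] at hi
      rw [if_pos (by omega)]
    have hm : m = n + (m - n) := by omega
    rw [h1, hm, List.range_add, List.map_append, List.sum_append]
    have h2 : (((List.range (m - n)).map (fun x => n + x)).map f).sum = 0 := by
      apply List.sum_eq_zero
      intro x hx
      simp only [List.map_map, List.mem_map, List.mem_range, Function.comp_def] at hx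
      obtain ⟨j, _, rfl⟩ := hx
      exact h0 _ (by omega)
    rw [h2, add_zero]
  · have hn : n = m + (n - m) := by omega
    rw [hn, List.range_add, List.map_append, List.sum_append]
    have h1 : ((List.range m).map (fun i => if i < m then f i else 0)) = (List.range m).map f := by
      apply List.map_congr_left; intro i hi
      rw [List.mem_range] at hi
      rw [if_pos hi]
    have h2 : ((((List.range (n - m)).map (fun x => m + x)).map (fun i => if i < m then f i else 0))).sum = 0 := by
      apply List.sum_eq_zero
      intro x hx
      simp only [List.map_map, List.mem_map, List.mem_range, Function.comp_def] at hx
      obtain ⟨j, _, rfl⟩ := hx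
      rw [if_neg (by omega)]
    rw [h1, h2, add_zero]

-- swap the two nested range sums (column-major ↔ row-major)
lemma pvSumSwap (f : Nat → Nat → Int) : ∀ (m n : Nat),
    ((List.range m).map (fun c => ((List.range n).map (fun r => f c r)).sum)).sum
    = ((List.range n).map (fun r => ((List.range m).map (fun c => f c r)).sum)).sum := by
  intro m n
  induction m with
  | zero => simp
  | succ k ih =>
    simp only [List.range_succ, List.map_append, List.sum_append, List.map_cons,
      List.map_nil, List.sum_cons, List.sum_nil, ih, add_zero]
    rw [PySem.List.sum_map_add_int (List.range n)
      (fun r => ((List.range k).map (fun c => f c r)).sum) (fun r => f k r)]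

-- pyRange 0 (len-1) as a Nat range
lemma pvRangeLenSubOne {α : Type} (l : List α) :
    PySem.List.pyRange 0 ((l.length : Int) - 1)
    = List.map (fun k : Nat => (k : Int)) (List.range (l.length - 1)) := by
  cases l with
  | nil => rfl
  | cons x t =>
    have h : ((x :: t).length : Int) - 1 = (t.length : Nat) := by simp only [List.length_cons]; push_cast; ring
    rw [h, PySem.List.pyRange_zero_natCast]
    simp

-- A's inner horizontal loop over one row, as a pvG-sum
lemma pvRowLoop (row : List String) (acc : Int) :
    (PySem.List.pyRange 0 ((row.length : Int) - 1)).foldl (fun a i =>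
      let x := (PySem.List.pyGet? row i).getD ""
      let y := (PySem.List.pyGet? row (i + 1)).getD ""
      if x == y && x != "." then a + ((PySem.Int.ofStr? x).getD 0) * 2 else a) acc
    = acc + pvH row := by
  unfold pvH
  rw [pvRangeLenSubOne, List.foldl_map]
  have hf : (fun (a : Int) (i : Nat) =>
      let x := (PySem.List.pyGet? row ((i : Int))).getD ""
      let y := (PySem.List.pyGet? row ((i : Int) + 1)).getD ""
      if x == y && x != "." then a + ((PySem.Int.ofStr? x).getD 0) * 2 else a)
      = (fun a i => a + pvG (row.getD i "") (row.getD (i+1) "")) := by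
    funext a i
    have h1 : ((i : Int) + 1) = ((i + 1 : Nat) : Int) := by push_cast; ring
    simp only [h1, PySem.List.pyGet?_natCast, ← List.getD_eq_getElem?_getD, pvG]
    split <;> simp
  rw [hf, PySem.List.foldl_add]

-- A's inner vertical loop for one column, as a pvG-sum over row indices
lemma pvColLoop (board : List (List String)) (c : Nat) (acc : Int) :
    (PySem.List.pyRange 0 ((board.length : Int) - 1)).foldl (fun a r =>
      let x := (PySem.List.pyGet? ((PySem.List.pyGet? board r).getD []) ((c : Int))).getD ""
      let y := (PySem.List.pyGet? ((PySem.List.pyGet? board (r + 1)).getD []) ((c : Int))).getD ""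
      if x == y && x != "." then a + ((PySem.Int.ofStr? x).getD 0) * 2 else a) acc
    = acc + ((List.range (board.length - 1)).map
        (fun r => pvG ((board.getD r []).getD c "") ((board.getD (r+1) []).getD c ""))).sum := by
  rw [pvRangeLenSubOne, List.foldl_map]
  have hf : (fun (a : Int) (r : Nat) =>
      let x := (PySem.List.pyGet? ((PySem.List.pyGet? board ((r : Int))).getD []) ((c : Int))).getD ""
      let y := (PySem.List.pyGet? ((PySem.List.pyGet? board ((r : Int) + 1)).getD []) ((c : Int))).getD ""
      if x == y && x != "." then a + ((PySem.Int.ofStr? x).getD 0) * 2 else a)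
      = (fun a r => a + pvG ((board.getD r []).getD c "") ((board.getD (r+1) []).getD c "")) := by
    funext a r
    have h1 : ((r : Int) + 1) = ((r + 1 : Nat) : Int) := by push_cast; ring
    simp only [h1, PySem.List.pyGet?_natCast, ← List.getD_eq_getElem?_getD, pvG]
    split <;> simp
  rw [hf, PySem.List.foldl_add]

-- A equals the common normal form: per-row horizontal scores plus consecutive-row vertical scores
lemma pvA_norm (board : List (List String)) :
    getCombinationValue board
    = (board.map pvH).sum
      + ((board.zip (board.drop 1)).map
          (fun p => pvV ((board.getD 0 []).length) p.1 p.2)).sum := by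
  unfold getCombinationValue
  have hH : (fun (acc : Int) (row : List String) =>
      (PySem.List.pyRange 0 ((row.length : Int) - 1)).foldl (fun a i =>
        let x := (PySem.List.pyGet? row i).getD ""
        let y := (PySem.List.pyGet? row (i + 1)).getD ""
        if x == y && x != "." then a + ((PySem.Int.ofStr? x).getD 0) * 2 else a) acc)
      = (fun acc row => acc + pvH row) := by
    funext acc row; exact pvRowLoop row acc
  rw [hH, PySem.List.foldl_add]
  dsimp only
  rw [show ((((PySem.List.pyGet? board 0).getD []).length : Int)) = (((PySem.List.pyGet? board 0).getD []).length : Nat) from rfl,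
    PySem.List.pyRange_zero_natCast, List.foldl_map]
  have hV : (fun (a : Int) (c : Nat) =>
      (PySem.List.pyRange 0 ((board.length : Int) - 1)).foldl (fun a r =>
        let x := (PySem.List.pyGet? ((PySem.List.pyGet? board r).getD []) ((c : Int))).getD ""
        let y := (PySem.List.pyGet? ((PySem.List.pyGet? board (r + 1)).getD []) ((c : Int))).getD ""
        if x == y && x != "." then a + ((PySem.Int.ofStr? x).getD 0) * 2 else a) a)
      = (fun a c => a + ((List.range (board.length - 1)).map
          (fun r => pvG ((board.getD r []).getD c "") ((board.getD (r+1) []).getD c ""))).sum) := by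
    funext a c; exact pvColLoop board c a
  rw [hV, PySem.List.foldl_add, pvSumSwap]
  have h0 : (PySem.List.pyGet? board 0).getD [] = board.getD 0 [] := by
    rw [show (0:Int) = ((0:Nat):Int) from rfl, PySem.List.pyGet?_natCast]
    simp [List.getD_eq_getElem?_getD]
  rw [h0]
  have hz := pvZipShift (([]) : List String)
    (fun r1 r2 => pvV ((board.getD 0 []).length) r1 r2) board
  simp only [pvV] at hz
  rw [hz]
  simp only [pvV]
  ring

-- pvG vanishes when the second component is the out-of-range default
lemma pvG_right_zero (a : String) : pvG a "" = 0 := by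
  unfold pvG
  by_cases h : ((a == "") && (a != ".")) = true
  · rw [if_pos h]
    have ha : a = "" := by rw [Bool.and_eq_true, beq_iff_eq] at h; exact h.1
    rw [ha]; decide
  · rw [if_neg h]

-- B's inner enumerate loop over one row = accumulator + horizontal score + vertical score against prev
lemma pvInnerB (cur : List String) (k : Nat) (po : Option (List String)) (t : Int) :
    (PySem.List.enumerate cur).foldl (fun t p =>
      let t := if decide (p.1 + 1 < (cur.length : Int)) && (p.2 == (PySem.List.pyGet? cur (p.1 + 1)).getD "") && p.2 != "."
               then t + 2 * ((PySem.Int.ofStr? p.2).getD 0) else t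
      match po with
      | some prev =>
          if decide (p.1 < ((k : Nat) : Int)) && ((PySem.List.pyGet? prev p.1).getD "" == p.2) && p.2 != "."
          then t + 2 * ((PySem.Int.ofStr? p.2).getD 0) else t
      | none => t) t
    = t + pvH cur + (match po with | some prev => pvV k prev cur | none => 0) := by
  rw [PySem.List.enumerate_eq_map_pyRange cur "", List.foldl_map]
  rw [show PySem.List.len cur = ((cur.length : Nat) : Int) from rfl, PySem.List.pyRange_zero_natCast, List.foldl_map]
  have hf : (fun (t : Int) (i : Nat) =>
      (fun t (p : Int × String) =>
        let t := if decide (p.1 + 1 < (cur.length : Int)) && (p.2 == (PySem.List.pyGet? cur (p.1 + 1)).getD "") && p.2 != "."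
                 then t + 2 * ((PySem.Int.ofStr? p.2).getD 0) else t
        match po with
        | some prev =>
            if decide (p.1 < ((k : Nat) : Int)) && ((PySem.List.pyGet? prev p.1).getD "" == p.2) && p.2 != "."
            then t + 2 * ((PySem.Int.ofStr? p.2).getD 0) else t
        | none => t) t ((fun j => (j, PySem.List.pyGetD cur j "")) (i : Int)))
      = (fun t i => t +
          ((if i < cur.length - 1 then pvG (cur.getD i "") (cur.getD (i+1) "") else 0)
           + (match po with
              | some prev => if i < k then pvG (prev.getD i "") (cur.getD i "") else 0
              | none => 0))) := by
    funext t i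
    simp only []
    have hcast : ((i : Int) + 1) = ((i + 1 : Nat) : Int) := by push_cast; ring
    have hg1 : (PySem.List.pyGetD cur (i : Int) "") = cur.getD i "" := by
      rw [PySem.List.pyGetD_natCast]
    have hg2 : (PySem.List.pyGet? cur ((i : Int) + 1)).getD "" = cur.getD (i+1) "" := by
      rw [hcast, PySem.List.pyGet?_natCast]
      exact (List.getD_eq_getElem?_getD).symm
    have hlt1 : decide ((i : Int) + 1 < (cur.length : Int)) = decide (i < cur.length - 1) := by
      by_cases h : i < cur.length - 1
      · rw [decide_eq_true (by omega : (i : Int) + 1 < (cur.length : Int)), decide_eq_true h]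
      · rw [decide_eq_false (by omega : ¬ ((i : Int) + 1 < (cur.length : Int))), decide_eq_false h]
    have hHstep : ∀ (t' : Int),
        (if decide (i < cur.length - 1) && (cur.getD i "" == cur.getD (i+1) "") && (cur.getD i "" != ".") then
          t' + 2 * ((PySem.Int.ofStr? (cur.getD i "")).getD 0) else t')
        = t' + (if i < cur.length - 1 then pvG (cur.getD i "") (cur.getD (i+1) "") else 0) := by
      intro t'
      by_cases h : i < cur.length - 1
      · rw [decide_eq_true h, Bool.true_and, if_pos h]
        unfold pvG
        by_cases hc : ((cur.getD i "" == cur.getD (i+1) "") && (cur.getD i "" != ".")) = true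
        · rw [if_pos hc, if_pos hc]; ring
        · rw [if_neg hc, if_neg hc, add_zero]
      · rw [decide_eq_false h, if_neg (by simp), if_neg h, add_zero]
    cases po with
    | none =>
      simp only [hg1, hg2, hlt1]
      rw [hHstep t, add_zero]
    | some prev =>
      have hg3 : (PySem.List.pyGet? prev ((i : Int))).getD "" = prev.getD i "" := by
        rw [PySem.List.pyGet?_natCast]
        exact (List.getD_eq_getElem?_getD).symm
      have hlt2 : decide ((i : Int) < ((k : Nat) : Int)) = decide (i < k) := by
        by_cases h : i < k
        · rw [decide_eq_true (by exact_mod_cast h), decide_eq_true h]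
        · rw [decide_eq_false (by exact_mod_cast h), decide_eq_false h]
      have hVstep : ∀ (t' : Int),
          (if decide (i < k) && (prev.getD i "" == cur.getD i "") && (cur.getD i "" != ".") then
            t' + 2 * ((PySem.Int.ofStr? (cur.getD i "")).getD 0) else t')
          = t' + (if i < k then pvG (prev.getD i "") (cur.getD i "") else 0) := by
        intro t'
        by_cases h : i < k
        · rw [decide_eq_true h, Bool.true_and, if_pos h, ← pvG_swap]
          by_cases hc : ((prev.getD i "" == cur.getD i "") && (cur.getD i "" != ".")) = true
          · rw [if_pos hc, if_pos hc]
          · rw [if_neg hc, if_neg hc, add_zero]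
        · rw [decide_eq_false h, if_neg (by simp), if_neg h, add_zero]
      simp only [hg1, hg2, hg3, hlt1, hlt2]
      rw [hHstep t, hVstep _, add_assoc]
  rw [hf, PySem.List.foldl_add, PySem.List.sum_map_add_int]
  have hhh : ((List.range cur.length).map
      (fun i => if i < cur.length - 1 then pvG (cur.getD i "") (cur.getD (i+1) "") else 0)).sum = pvH cur := by
    unfold pvH
    exact pvSumIte (fun i => pvG (cur.getD i "") (cur.getD (i+1) "")) cur.length (cur.length - 1)
      (fun c hc => by
        show pvG (cur.getD c "") (cur.getD (c+1) "") = 0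
        rw [List.getD_eq_default _ _ hc, pvG_left_default])
  rw [hhh]
  cases po with
  | none => simp
  | some prev =>
    have hvv : ((List.range cur.length).map
        (fun i => if i < k then pvG (prev.getD i "") (cur.getD i "") else 0)).sum = pvV k prev cur := by
      unfold pvV
      exact pvSumIte (fun c => pvG (prev.getD c "") (cur.getD c "")) cur.length k
        (fun c hc => by
          show pvG (prev.getD c "") (cur.getD c "") = 0
          rw [List.getD_eq_default _ _ hc, pvG_right_zero])
    rw [hvv]
    ring

-- B's outer fold, from a state with a previous row
lemma pvGoB (k : Nat) : ∀ (rest : List (List String)) (p : List String) (t : Int),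
    (rest.foldl (fun (st : Option (List String) × Int) cur =>
      let total := (PySem.List.enumerate cur).foldl (fun t q =>
        let t := if decide (q.1 + 1 < (cur.length : Int)) && (q.2 == (PySem.List.pyGet? cur (q.1 + 1)).getD "") && q.2 != "."
                 then t + 2 * ((PySem.Int.ofStr? q.2).getD 0) else t
        match st.1 with
        | some prev =>
            if decide (q.1 < ((k : Nat) : Int)) && ((PySem.List.pyGet? prev q.1).getD "" == q.2) && q.2 != "."
            then t + 2 * ((PySem.Int.ofStr? q.2).getD 0) else t
        | none => t) st.2
      (some cur, total)) (some p, t)).2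
    = t + (rest.map pvH).sum + (((p :: rest).zip rest).map (fun q => pvV k q.1 q.2)).sum := by
  intro rest
  induction rest with
  | nil => intro p t; simp
  | cons cur rest' ih =>
    intro p t
    simp only [List.foldl_cons]
    rw [pvInnerB cur k (some p) t]
    rw [ih cur _]
    simp only [List.map_cons, List.sum_cons, List.zip_cons_cons]
    ring

theorem getCombinationValue_spec : Claim_equal_getCombinationValue := by
  intro board _ _
  unfold Spec_getCombinationValue
  rw [pvA_norm]
  unfold getCombinationValue_alt
  cases board with
  | nil => rfl
  | cons b0 rest =>
    simp only [List.foldl_cons]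
    rw [pvInnerB b0 (((PySem.List.pyGet? (b0 :: rest) 0).getD []).length) none 0]
    rw [pvGoB _ rest b0 _]
    have h0 : (PySem.List.pyGet? (b0 :: rest) 0).getD [] = (b0 :: rest).getD 0 [] := by
      rw [show (0:Int) = ((0:Nat):Int) from rfl, PySem.List.pyGet?_natCast]
      exact (List.getD_eq_getElem?_getD).symm
    simp only [h0, List.getD_cons_zero, List.map_cons, List.sum_cons, List.drop_one,
      List.tail_cons]
    ring
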